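-- pv_equiv track=rewrite | github.com/Young0313/HAP | community_enhance.py | cluster_convert
-- ===== SOURCE A (Python) =====
-- def cluster_convert(clusters_dict):
--     clusters = list(set(clusters_dict.values()))
--     length = len(clusters)
--     result = []
--     for _ in range(length):
--         result.append([])
--     for u in clusters_dict.keys():
--         result[clusters.index(clusters_dict[u])].append(u)
--     return result
-- ===== SOURCE B (Python) =====
-- def cluster_convert(clusters_dict):
--     # Gather each group directly by filtering the items per cluster value,
--     # instead of pre-allocating slots and scattering keys by computed index.
--     return [[u for u, c in clusters_dict.items() if c == value]
--             for value in list(set(clusters_dict.values()))]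
-- ===== Notes on version B (the rewrite author's own statement) =====
-- stated objective: simpler
-- what changed: A scatters: it pre-allocates one empty slot per distinct value and, looping over the keys, appends each key at result[clusters.index(value)]; B gathers: it loops over the distinct values and builds each group as a direct filter of the items, with no result mutation, no pre-allocation and no index arithmetic.
import Mathlib
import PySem

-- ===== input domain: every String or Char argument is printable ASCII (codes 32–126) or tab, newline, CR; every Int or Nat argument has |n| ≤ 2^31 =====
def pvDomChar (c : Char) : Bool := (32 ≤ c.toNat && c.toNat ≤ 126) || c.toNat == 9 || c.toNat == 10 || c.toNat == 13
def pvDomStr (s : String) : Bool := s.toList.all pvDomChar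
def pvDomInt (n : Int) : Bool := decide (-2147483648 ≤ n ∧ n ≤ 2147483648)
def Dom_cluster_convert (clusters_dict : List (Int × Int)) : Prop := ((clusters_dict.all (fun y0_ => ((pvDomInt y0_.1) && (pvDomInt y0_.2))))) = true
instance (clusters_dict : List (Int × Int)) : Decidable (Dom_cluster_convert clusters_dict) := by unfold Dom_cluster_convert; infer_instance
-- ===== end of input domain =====

-- B gathers each group by filtering the items per distinct value, instead of A's
-- pre-allocate-then-scatter by computed index (simpler: no mutation, no index arithmetic).
-- list(set(...)) is modelled as PySem.Set.ofList (first-occurrence order) in both ports.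

-- ===== PORT A =====
def cluster_convert (clusters_dict : List (Int × Int)) : List (List Int) :=
  let d : PySem.Dict Int Int := PySem.Dict.mk clusters_dict
  let clusters : List Int := PySem.Set.ofList d.values
  let length : Nat := clusters.length
  let result : List (List Int) :=
    (PySem.List.pyRange 0 (length : Int)).foldl (fun r _ => r ++ [([] : List Int)]) []
  -- result[clusters.index(clusters_dict[u])].append(u): u is a key and its value is in
  -- clusters, so the lookup and the .index never raise; total forms used, index in range.
  d.keys.foldl (fun r u =>
    PySem.List.pySetD r (((PySem.List.index? clusters (d.getD u 0)).getD 0 : Nat) : Int)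
      (PySem.List.pyGetD r (((PySem.List.index? clusters (d.getD u 0)).getD 0 : Nat) : Int)
        ([] : List Int) ++ [u])) result

-- ===== PORT B =====
def cluster_convert_alt (clusters_dict : List (Int × Int)) : List (List Int) :=
  let d : PySem.Dict Int Int := PySem.Dict.mk clusters_dict
  (PySem.Set.ofList d.values).map (fun value =>
    (d.items.filter (fun p => p.2 == value)).map (fun p => p.1))

-- ===== PRECONDITION & SPEC =====
-- Pre_ excludes association lists with duplicate keys: they do not represent a Python
-- dict (the argument is dict[int,int], whose keys are unique), so A is never called on them.
def Pre_cluster_convert (clusters_dict : List (Int × Int)) : Prop :=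
  (clusters_dict.map Prod.fst).Nodup
instance (clusters_dict : List (Int × Int)) : Decidable (Pre_cluster_convert clusters_dict) := by
  unfold Pre_cluster_convert; infer_instance

def pvWitness_cluster_convert : (List (Int × Int)) := [(1, 5), (2, 3), (3, 5)]

def Spec_cluster_convert (clusters_dict : List (Int × Int)) (out : List (List Int)) : Prop := out = cluster_convert_alt clusters_dict
instance (clusters_dict : List (Int × Int)) (out : List (List Int)) : Decidable (Spec_cluster_convert clusters_dict out) := by unfold Spec_cluster_convert; infer_instance

-- ===== CLAIM (what is proved, stated in full; the proofs are below) =====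
def Claim_equal_cluster_convert : Prop := ∀ (clusters_dict : List (Int × Int)), Dom_cluster_convert clusters_dict → Pre_cluster_convert clusters_dict → Spec_cluster_convert clusters_dict (cluster_convert clusters_dict)

-- ===== LEMMAS AND PROOFS =====

-- A's empty-list pre-allocation loop builds replicate.
theorem append_nil_loop {α β : Type} (xs : List α) (acc : List (List β)) :
    xs.foldl (fun r _ => r ++ [([] : List β)]) acc = acc ++ List.replicate xs.length [] := by
  induction xs generalizing acc with
  | nil => simp
  | cons x xs ih =>
    rw [List.foldl_cons, ih, List.append_assoc]
    simp [List.replicate_succ]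

-- A's scatter loop preserves the length of result.
theorem scatter_length (ix : Int → Nat) (ks : List Int) :
    ∀ r : List (List Int),
      (ks.foldl (fun r u =>
        PySem.List.pySetD r ((ix u : Nat) : Int)
          (PySem.List.pyGetD r ((ix u : Nat) : Int) ([] : List Int) ++ [u])) r).length
      = r.length := by
  induction ks with
  | nil => intro r; rfl
  | cons k ks ih => intro r; rw [List.foldl_cons, ih, PySem.List.length_pySetD]

-- Entry j of A's scatter loop: initial entry plus the keys whose index is j, in order.
theorem scatter_getD (ix : Int → Nat) (ks : List Int) :
    ∀ (r : List (List Int)) (j : Nat), j < r.length → (∀ u ∈ ks, ix u < r.length) →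
      PySem.List.pyGetD (ks.foldl (fun r u =>
          PySem.List.pySetD r ((ix u : Nat) : Int)
            (PySem.List.pyGetD r ((ix u : Nat) : Int) ([] : List Int) ++ [u])) r)
        (j : Int) []
      = PySem.List.pyGetD r (j : Int) [] ++ ks.filter (fun u => ix u == j) := by
  induction ks with
  | nil => intro r j hj _; simp
  | cons k ks ih =>
    intro r j hj hmem
    have hk : ix k < r.length := hmem k (by simp)
    have hlen : (PySem.List.pySetD r ((ix k : Nat) : Int)
        (PySem.List.pyGetD r ((ix k : Nat) : Int) [] ++ [k])).length = r.length :=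
      PySem.List.length_pySetD _ _ _
    rw [List.foldl_cons, ih _ j (by rw [hlen]; exact hj)
        (by intro u hu; rw [hlen]; exact hmem u (by simp [hu]))]
    rw [PySem.List.pyGetD_pySetD_natCast _ _ _ _ _ hk]
    by_cases h : j = ix k
    · subst h; simp
    · simp [h, Ne.symm h, PySem.List.pyGetD]

-- In a Nodup list, comparing the found index with j is comparing the value with entry j.
theorem index_getD_beq (clusters : List Int) (hnd : clusters.Nodup) (c : Int)
    (hc : c ∈ clusters) (j : Nat) (hj : j < clusters.length) :
    (((PySem.List.index? clusters c).getD 0 : Nat) == j) = (c == clusters[j]) := by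
  have hx : PySem.List.index? clusters c = List.idxOf? c clusters := by
    simp [PySem.List.index?]
  obtain ⟨i, hi⟩ : ∃ i, List.idxOf? c clusters = some i := by
    have : (List.idxOf? c clusters).isSome := by
      simpa [List.isSome_idxOf?] using hc
    exact Option.isSome_iff_exists.mp this
  obtain ⟨hilt, hival, -⟩ := List.idxOf?_eq_some_iff.mp hi
  rw [hx, hi]
  simp only [Option.getD_some]
  by_cases h : i = j
  · subst h; simp [hival]
  · have : clusters[j] ≠ c := by
      intro hcj
      exact h (hnd.getElem_inj_iff.mp (hival.trans hcj.symm))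
    simp [h, Ne.symm this]

-- The first index of each key's value is within clusters.
theorem index_getD_lt (clusters : List Int) (c : Int) (hc : c ∈ clusters) :
    ((PySem.List.index? clusters c).getD 0 : Nat) < clusters.length := by
  have hx : PySem.List.index? clusters c = List.idxOf? c clusters := by
    simp [PySem.List.index?]
  obtain ⟨i, hi⟩ : ∃ i, List.idxOf? c clusters = some i := by
    have : (List.idxOf? c clusters).isSome := by
      simpa [List.isSome_idxOf?] using hc
    exact Option.isSome_iff_exists.mp this
  obtain ⟨hilt, -, -⟩ := List.idxOf?_eq_some_iff.mp hi
  rw [hx, hi]; simpa using hilt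

-- ===== VERDICT (by name: the statement is the Claim_ definition above) =====
theorem cluster_convert_spec : Claim_equal_cluster_convert := by
  intro l _ hpre
  unfold Spec_cluster_convert cluster_convert cluster_convert_alt
  simp only [PySem.Dict.keys_mk, PySem.Dict.values_mk]
  set clusters : List Int := PySem.Set.ofList (l.map (fun x => x.2)) with hcl
  have hnd : clusters.Nodup := PySem.Set.nodup_ofList _
  have hkeys : ((PySem.Dict.mk l).keys).Nodup := by
    simpa [PySem.Dict.keys_mk] using hpre
  -- the initial result is replicate
  have hinit : (PySem.List.pyRange 0 (clusters.length : Int)).foldl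
      (fun r _ => r ++ [([] : List Int)]) [] = List.replicate clusters.length [] := by
    rw [append_nil_loop]
    simp [PySem.List.pyRange_zero_natCast]
  rw [hinit]
  -- each key's value is in clusters
  have hval : ∀ p ∈ l, (PySem.Dict.mk l).getD p.1 0 = p.2 := by
    intro p hp
    exact PySem.Dict.getD_of_mem_items _ hp hkeys 0
  have hmem : ∀ u ∈ l.map (fun x => x.1),
      ((PySem.List.index? clusters ((PySem.Dict.mk l).getD u 0)).getD 0 : Nat)
        < (List.replicate (α := List Int) clusters.length []).length := by
    intro u hu
    obtain ⟨p, hp, rfl⟩ := List.mem_map.mp hu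
    rw [hval p hp, List.length_replicate]
    exact index_getD_lt clusters p.2 ((PySem.Set.mem_ofList _ _).mpr (List.mem_map_of_mem hp))
  apply List.ext_getElem
  · rw [scatter_length (fun u => (PySem.List.index? clusters ((PySem.Dict.mk l).getD u 0)).getD 0)]
    simp
  · intro j hj hj'
    have hjc : j < clusters.length := by simpa using hj'
    have hget := scatter_getD
      (fun u => (PySem.List.index? clusters ((PySem.Dict.mk l).getD u 0)).getD 0)
      (l.map (fun x => x.1)) (List.replicate clusters.length []) j
      (by simpa using hjc) hmem
    beta_reduce at hget
    rw [PySem.List.pyGetD_natCast, PySem.List.pyGetD_natCast] at hget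
    rw [← List.getD_eq_getElem _ ([] : List Int) hj, hget]
    rw [List.getD_eq_getElem _ _ (by simpa using hjc), List.getElem_replicate, List.nil_append]
    rw [List.getElem_map, List.filter_map]
    congr 1
    apply List.filter_congr
    intro p hp
    simp only [Function.comp_apply]
    rw [hval p hp]
    exact index_getD_beq clusters hnd p.2
      ((PySem.Set.mem_ofList _ _).mpr (List.mem_map_of_mem hp)) j hjc
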